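-- pv_equiv track=rewrite | github.com/gunthercox/ChatterBot | chatterbot/apis/__init__.py | remove_leeding_usernames
-- ===== SOURCE A (Python) =====
-- def remove_leeding_usernames(text):
--
--     # The base case is that the is only one word
--     if not len(text.split(" ", 1)) > 1:
--         return text
--
--     if text and text[0] == "@":
--         if len(text.split(" ", 1)) > 1:
--
--             # Split the text at the first space character
--             text = text.split(" ", 1)[1]
--             text = "".join(text)
--
--     if text and text[0] == "@":
--         text = remove_leeding_usernames(text)
--
--     return text
-- ===== SOURCE B (Python) =====
-- def remove_leeding_usernames(text):
--     # Split once on single spaces (preserving empty tokens from runs of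
--     # spaces), skip leading '@'-tokens but never the last token, rejoin.
--     tokens = text.split(" ")
--     i = 0
--     while i < len(tokens) - 1 and tokens[i].startswith("@"):
--         i += 1
--     return " ".join(tokens[i:])
-- ===== Notes on version B (the rewrite author's own statement) =====
-- stated objective: alternative
-- what changed: Replaces A's recursive repeated split(' ',1) with a single split(' ') into the full token list, an index scan past leading '@'-tokens that never consumes the last token, and one join.
import Mathlib
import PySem

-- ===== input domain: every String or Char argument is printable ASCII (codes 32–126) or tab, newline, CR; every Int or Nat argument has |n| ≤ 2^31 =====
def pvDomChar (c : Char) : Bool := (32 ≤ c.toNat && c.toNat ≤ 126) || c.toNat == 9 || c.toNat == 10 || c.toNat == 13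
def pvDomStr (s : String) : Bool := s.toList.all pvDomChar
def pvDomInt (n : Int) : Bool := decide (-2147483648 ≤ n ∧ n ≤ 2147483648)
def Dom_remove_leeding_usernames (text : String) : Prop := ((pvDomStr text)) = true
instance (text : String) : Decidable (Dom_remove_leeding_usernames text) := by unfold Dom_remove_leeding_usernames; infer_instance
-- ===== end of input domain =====

-- B replaces A's recursive repeated split(" ",1) by one full split(" "), an index
-- scan past leading '@'-tokens that never consumes the last token, and one join.

-- Characterisation of text.split(" ", 1), cited by port A's decreasing_by.
theorem pvGo_zero (fuel : Nat) (rest : List Char) (acc : List (List Char)) :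
    PySem.Chars.splitOnMax.go [' '] fuel 0 rest [] acc = (rest :: acc).reverse := by
  cases fuel with
  | zero => simp [PySem.Chars.splitOnMax.go]
  | succ f => cases rest <;> simp [PySem.Chars.splitOnMax.go]

theorem pvGo_one (l : List Char) (fuel : Nat) (cur : List Char) (acc : List (List Char))
    (h : l.length ≤ fuel) :
    PySem.Chars.splitOnMax.go [' '] fuel 1 l cur acc =
      if ' ' ∈ l then
        ((l.dropWhile (· ≠ ' ')).tail :: (cur.reverse ++ l.takeWhile (· ≠ ' ')) :: acc).reverse
      else ((cur.reverse ++ l) :: acc).reverse := by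
  induction l generalizing fuel cur acc with
  | nil => cases fuel <;> simp [PySem.Chars.splitOnMax.go]
  | cons c rest ih =>
    cases fuel with
    | zero => simp at h
    | succ f =>
      by_cases hc : c = ' '
      · subst hc
        simp [PySem.Chars.splitOnMax.go, List.isPrefixOf, pvGo_zero,
          List.dropWhile, List.takeWhile]
      · have hrest : rest.length ≤ f := by simpa using h
        simp [PySem.Chars.splitOnMax.go, List.isPrefixOf, hc, ih f (c :: cur) acc hrest,
          List.dropWhile, List.takeWhile, Ne.symm hc]

theorem pvSplit (cs : List Char) :
    PySem.Chars.splitOnMax cs [' '] 1 =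
      if ' ' ∈ cs then [cs.takeWhile (· ≠ ' '), (cs.dropWhile (· ≠ ' ')).tail] else [cs] := by
  rw [PySem.Chars.splitOnMax]
  simp [pvGo_one cs (cs.length + 1) [] [] (by omega)]

theorem pvParts (text : String) :
    (PySem.Str.splitMax? text " " 1).getD [] =
      if ' ' ∈ text.toList then
        [String.ofList (text.toList.takeWhile (· ≠ ' ')),
         String.ofList ((text.toList.dropWhile (· ≠ ' ')).tail)]
      else [text] := by
  rw [PySem.Str.splitMax?, PySem.Chars.splitMax?]
  simp [pvSplit]
  split <;> simp

theorem pvLenGt (text : String) :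
    (((PySem.Str.splitMax? text " " 1).getD []).length > 1) ↔ ' ' ∈ text.toList := by
  rw [pvParts]; split <;> simp_all

theorem pvNext (text : String) (h : ' ' ∈ text.toList) :
    ((PySem.Str.splitMax? text " " 1).getD []).getD 1 "" =
      String.ofList ((text.toList.dropWhile (· ≠ ' ')).tail) := by
  rw [pvParts]; simp [h]

theorem pvDropTail_lt (l : List Char) (h : ' ' ∈ l) :
    ((l.dropWhile (· ≠ ' ')).tail).length < l.length := by
  have hne : l.dropWhile (· ≠ ' ') ≠ [] := by
    intro hnil
    have := List.dropWhile_eq_nil_iff.mp hnil ' ' h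
    simp at this
  have hle : (l.dropWhile (· ≠ ' ')).length ≤ l.length := List.length_dropWhile_le _ _
  have hpos : 0 < (l.dropWhile (· ≠ ' ')).length := List.length_pos_iff.mpr hne
  have htail : ((l.dropWhile (· ≠ ' ')).tail).length =
      (l.dropWhile (· ≠ ' ')).length - 1 := List.length_tail ..
  omega

theorem pvStep_lt (text : String) (h : ' ' ∈ text.toList) :
    (((PySem.Str.splitMax? text " " 1).getD []).getD 1 "").toList.length
      < text.toList.length := by
  rw [pvNext text h, String.toList_ofList]
  exact pvDropTail_lt _ h

-- ===== PORT A =====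
def remove_leeding_usernames (text : String) : String :=
  if ¬ (((PySem.Str.splitMax? text " " 1).getD []).length > 1) then text
  else
    let text1 :=
      if !text.isEmpty && (PySem.Str.pyGet? text 0 == some '@') then
        if ((PySem.Str.splitMax? text " " 1).getD []).length > 1 then
          -- text = text.split(" ", 1)[1]; "".join(text) of a str is that same str
          ((PySem.Str.splitMax? text " " 1).getD []).getD 1 ""
        else text
      else text
    if !text1.isEmpty && (PySem.Str.pyGet? text1 0 == some '@') then
      remove_leeding_usernames text1
    else text1
termination_by text.toList.length
decreasing_by
  rename_i h1 h2
  have hlen : 1 < ((PySem.Str.splitMax? text " " 1).getD []).length := not_not.mp h1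
  by_cases hat : (!text.isEmpty && (PySem.Str.pyGet? text 0 == some '@')) = true
  · rw [dif_pos hat, dif_pos hlen]
    exact pvStep_lt text ((pvLenGt text).mp hlen)
  · simp only [text1, dif_neg hat] at h2
    exact absurd h2 hat

-- ===== PORT B =====
-- the while loop over index i, returning " ".join(tokens[i:]): advancing i past a
-- leading '@'-token (i < len(tokens) - 1 ↔ the remaining suffix has a tail)
def pvSkipAt : List String → List String
  | [] => []
  | t :: rest => if !rest.isEmpty && PySem.Str.startswith t "@" then pvSkipAt rest else t :: rest

def remove_leeding_usernames_alt (text : String) : String :=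
  let tokens := (PySem.Str.split? text " ").getD []
  PySem.Str.join " " (pvSkipAt tokens)

-- ===== PRECONDITION & SPEC =====
def Spec_remove_leeding_usernames (text : String) (out : String) : Prop := out = remove_leeding_usernames_alt text
instance (text : String) (out : String) : Decidable (Spec_remove_leeding_usernames text out) := by unfold Spec_remove_leeding_usernames; infer_instance

-- ===== CLAIM (what is proved, stated in full; the proofs are below) =====
def Claim_equal_remove_leeding_usernames : Prop := ∀ (text : String), Dom_remove_leeding_usernames text → Spec_remove_leeding_usernames text (remove_leeding_usernames text)

-- ===== LEMMAS AND PROOFS =====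

-- pure characterisation of splitting on a single space
def pvMySplit (l : List Char) : List (List Char) :=
  if h : ' ' ∈ l then l.takeWhile (· ≠ ' ') :: pvMySplit ((l.dropWhile (· ≠ ' ')).tail)
  else [l]
termination_by l.length
decreasing_by exact pvDropTail_lt l h

theorem pvMySplit_eq (l : List Char) :
    pvMySplit l = l.takeWhile (· ≠ ' ') ::
      (if ' ' ∈ l then pvMySplit ((l.dropWhile (· ≠ ' ')).tail) else []) := by
  rw [pvMySplit]
  split
  · simp_all
  · rename_i h
    have ht : List.takeWhile (· ≠ ' ') l = l :=
      List.takeWhile_eq_self_iff.mpr (fun c hc => by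
        simpa using fun he : c = ' ' => h (he ▸ hc))
    rw [ht]

theorem pvMySplit_ne_nil (l : List Char) : pvMySplit l ≠ [] := by
  rw [pvMySplit_eq]; simp

theorem pvGoSpec (l : List Char) (fuel : Nat) (cur : List Char) (acc : List (List Char))
    (h : l.length ≤ fuel) :
    PySem.Chars.splitOn.go [' '] fuel l cur acc =
      acc.reverse ++ ((cur.reverse ++ l.takeWhile (· ≠ ' ')) ::
        (if ' ' ∈ l then pvMySplit ((l.dropWhile (· ≠ ' ')).tail) else [])) := by
  induction l generalizing fuel cur acc with
  | nil => cases fuel <;> simp [PySem.Chars.splitOn.go]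
  | cons c rest ih =>
    cases fuel with
    | zero => simp at h
    | succ f =>
      by_cases hc : c = ' '
      · subst hc
        rw [show PySem.Chars.splitOn.go [' '] (f+1) (' '::rest) cur acc =
            PySem.Chars.splitOn.go [' '] f rest [] (cur.reverse :: acc) by
          simp [PySem.Chars.splitOn.go, List.isPrefixOf]]
        rw [ih f [] (cur.reverse :: acc) (by simpa using h)]
        simp [List.takeWhile, List.dropWhile, pvMySplit_eq rest]
      · have hrest : rest.length ≤ f := by simpa using h
        have hpre : List.isPrefixOf [' '] (c :: rest) = false := by
          simp [List.isPrefixOf, Ne.symm hc]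
        rw [show PySem.Chars.splitOn.go [' '] (f+1) (c::rest) cur acc =
            PySem.Chars.splitOn.go [' '] f rest (c :: cur) acc by
          simp [PySem.Chars.splitOn.go, hpre]]
        rw [ih f (c :: cur) acc hrest]
        simp [List.takeWhile, List.dropWhile, hc, Ne.symm hc]

theorem pvSplitOn (l : List Char) :
    PySem.Chars.splitOn l [' '] = pvMySplit l := by
  rw [PySem.Chars.splitOn, pvGoSpec l (l.length + 1) [] [] (by omega)]
  simp only [List.reverse_nil, List.nil_append]
  exact (pvMySplit_eq l).symm

theorem pvJoinMySplit (l : List Char) : PySem.Chars.join [' '] (pvMySplit l) = l := by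
  rw [pvMySplit]
  split
  · rename_i h
    have := pvJoinMySplit ((l.dropWhile (· ≠ ' ')).tail)
    rcases hm : pvMySplit ((l.dropWhile (· ≠ ' ')).tail) with _ | ⟨p, ps⟩
    · exact absurd hm (pvMySplit_ne_nil _)
    · rw [hm] at this
      rw [PySem.Chars.join_cons_cons, this]
      have hd : l.dropWhile (· ≠ ' ') = ' ' :: (l.dropWhile (· ≠ ' ')).tail := by
        have hne : l.dropWhile (· ≠ ' ') ≠ [] := by
          intro hnil
          have := List.dropWhile_eq_nil_iff.mp hnil ' ' h
          simp at this
        rcases he : l.dropWhile (· ≠ ' ') with _ | ⟨d, ds⟩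
        · exact absurd he hne
        · have hdhead : ¬ (d ≠ ' ') := by
            have := List.head?_dropWhile_not (p := fun c => decide (c ≠ ' ')) l
            rw [he] at this; simpa using this
          simp at hdhead; simp [hdhead]
      conv_rhs => rw [← List.takeWhile_append_dropWhile (p := fun c => decide (c ≠ ' ')) (l := l), hd]
      simp
  · exact PySem.Chars.join_singleton _ _
termination_by l.length
decreasing_by rename_i h; exact pvDropTail_lt l h

theorem pvTokens (text : String) :
    (PySem.Str.split? text " ").getD [] = (pvMySplit text.toList).map String.ofList := by
  rw [PySem.Str.split?, PySem.Chars.split?]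
  simp [pvSplitOn]

theorem pvB_eq (text : String) :
    remove_leeding_usernames_alt text =
      PySem.Str.join " " (pvSkipAt ((pvMySplit text.toList).map String.ofList)) := by
  rw [remove_leeding_usernames_alt, pvTokens]

theorem pvRound (text : String) :
    PySem.Str.join " " ((pvMySplit text.toList).map String.ofList) = text := by
  rw [PySem.Str.join]
  have hmap : (List.map String.toList ((pvMySplit text.toList).map String.ofList)) =
      pvMySplit text.toList := by simp [Function.comp_def]
  have hsep : (" " : String).toList = [' '] := rfl
  rw [hmap, hsep, pvJoinMySplit, String.ofList_toList]

theorem pvOfList_isEmpty (l : List Char) : (String.ofList l).isEmpty = l.isEmpty := by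
  cases l with
  | nil => decide
  | cons c cs =>
    simp only [List.isEmpty_cons]
    rw [Bool.eq_false_iff]
    intro h
    have := congrArg String.toList (String.isEmpty_iff.mp h)
    simp at this

-- A's "text and text[0] == '@'" equals text.startswith("@").
theorem pvHead (text : String) :
    (!text.isEmpty && (PySem.Str.pyGet? text 0 == some '@')) = PySem.Str.startswith text "@" := by
  rw [PySem.Str.pyGet?, PySem.Str.startswith]
  rw [show text = String.ofList text.toList from (String.ofList_toList).symm]
  generalize text.toList = l
  cases l with
  | nil => simp [PySem.Chars.startswith, PySem.Chars.pyGet?]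
  | cons c cs =>
    simp [PySem.Chars.startswith, List.isPrefixOf, pvOfList_isEmpty]
    exact eq_comm

-- the first token starts with '@' iff the text does (when a space is present or not)
theorem pvTok0 (l : List Char) :
    PySem.Str.startswith (String.ofList (l.takeWhile (· ≠ ' '))) "@" =
      PySem.Str.startswith (String.ofList l) "@" := by
  rw [PySem.Str.startswith, PySem.Str.startswith]
  cases l with
  | nil => simp [List.takeWhile]
  | cons c cs =>
    by_cases hc : c = ' '
    · subst hc
      simp [List.takeWhile, PySem.Chars.startswith, List.isPrefixOf]
    · simp [List.takeWhile, hc, PySem.Chars.startswith, List.isPrefixOf]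

theorem pvA_nospace (text : String) (hsp : ' ' ∉ text.toList) :
    remove_leeding_usernames text = text := by
  rw [remove_leeding_usernames,
    if_pos (fun hgt => hsp ((pvLenGt text).mp hgt))]

theorem pvA_not_at (text : String) (hat : PySem.Str.startswith text "@" = false) :
    remove_leeding_usernames text = text := by
  rw [remove_leeding_usernames]
  split
  · rfl
  · have hg : (!text.isEmpty && (PySem.Str.pyGet? text 0 == some '@')) = false := by
      rw [pvHead]; exact hat
    simp only [hg, Bool.false_eq_true, if_false]

theorem pvA_step (text : String) (hsp : ' ' ∈ text.toList)
    (hat : PySem.Str.startswith text "@" = true) :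
    remove_leeding_usernames text =
      remove_leeding_usernames (String.ofList ((text.toList.dropWhile (· ≠ ' ')).tail)) := by
  have hlen : 1 < ((PySem.Str.splitMax? text " " 1).getD []).length := (pvLenGt text).mpr hsp
  rw [remove_leeding_usernames, if_neg (not_not_intro hlen)]
  simp only [pvHead, hat, if_pos hlen, if_true, pvNext text hsp]
  set next := String.ofList ((text.toList.dropWhile (· ≠ ' ')).tail) with hnext
  by_cases h2 : PySem.Str.startswith next "@" = true
  · rw [if_pos h2]
  · rw [if_neg h2]
    rw [Bool.not_eq_true] at h2
    exact (pvA_not_at next h2).symm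

theorem pvMain : ∀ (n : Nat) (text : String), text.toList.length ≤ n →
    remove_leeding_usernames text = remove_leeding_usernames_alt text := by
  intro n
  induction n with
  | zero =>
    intro text h
    have hnil : text.toList = [] := List.eq_nil_of_length_eq_zero (by omega)
    have hsp : ' ' ∉ text.toList := by simp [hnil]
    rw [pvA_nospace text hsp, pvB_eq, pvMySplit, dif_neg hsp]
    simp [pvSkipAt]
    rw [PySem.Str.join]
    simp [PySem.Chars.join_singleton, String.ofList_toList]
  | succ n ih =>
    intro text h
    by_cases hsp : ' ' ∈ text.toList
    · set rest := (text.toList.dropWhile (· ≠ ' ')).tail with hrest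
      have hexp : pvMySplit text.toList =
          text.toList.takeWhile (· ≠ ' ') :: pvMySplit rest := by
        rw [pvMySplit, dif_pos hsp]
      by_cases hat : PySem.Str.startswith text "@" = true
      · -- both strip the first token and continue
        rw [pvA_step text hsp hat, pvB_eq, hexp]
        have htok : PySem.Str.startswith
            (String.ofList (text.toList.takeWhile (· ≠ ' '))) "@" = true := by
          rw [pvTok0, String.ofList_toList]; exact hat
        have hne : ((pvMySplit rest).map String.ofList).isEmpty = false := by
          rcases hm : pvMySplit rest with _ | ⟨p, ps⟩
          · exact absurd hm (pvMySplit_ne_nil _)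
          · simp
        rw [List.map_cons, pvSkipAt, if_pos (by rw [hne, htok]; rfl)]
        rw [ih (String.ofList rest) (by
          rw [String.toList_ofList]
          have hlt := pvDropTail_lt text.toList hsp
          rw [← hrest] at hlt
          omega)]
        rw [pvB_eq (String.ofList rest), String.toList_ofList]
      · -- A keeps text; B's scan stops at the first token
        rw [Bool.not_eq_true] at hat
        rw [pvA_not_at text hat, pvB_eq, hexp, List.map_cons, pvSkipAt]
        rw [if_neg (by
          rw [pvTok0, String.ofList_toList, hat]; simp)]
        rw [← List.map_cons, ← hexp, pvRound]
    · rw [pvA_nospace text hsp, pvB_eq, pvMySplit, dif_neg hsp]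
      simp [pvSkipAt]
      rw [PySem.Str.join]
      simp [PySem.Chars.join_singleton, String.ofList_toList]

-- ===== VERDICT (by name: the statement is the Claim_ definition above) =====
theorem remove_leeding_usernames_spec : Claim_equal_remove_leeding_usernames := by
  intro text _
  unfold Spec_remove_leeding_usernames
  exact pvMain text.toList.length text le_rfl
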